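-- pv_equiv track=rewrite | github.com/piyushkashyap07/recursion | checkAB.py | checkab
-- ===== SOURCE A (Python) =====
-- def checkab(s):
--     if len(s)==0:
--         return True
--     if s[0]=="a":
--         if len(s[1:])>1 and s[1:3]=="bb":
--             return checkab(s[3:])
--         else:
--             return checkab(s[1:])
--     else:
--         return False
-- ===== SOURCE B (Python) =====
-- def checkab(s):
--     # One pass with an index pointer: no slicing, no recursion (O(n) vs A's O(n^2)).
--     i, n = 0, len(s)
--     while i < n:
--         if s[i] != 'a':
--             return False
--         if i + 3 <= n and s[i + 1] == 'b' and s[i + 2] == 'b':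
--             i += 3
--         else:
--             i += 1
--     return True
-- ===== Notes on version B (the rewrite author's own statement) =====
-- stated objective: faster
-- what changed: Replaced recursive slicing (each call copies the rest of the string) by a single while-loop scanning with an index pointer.
import Mathlib
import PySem

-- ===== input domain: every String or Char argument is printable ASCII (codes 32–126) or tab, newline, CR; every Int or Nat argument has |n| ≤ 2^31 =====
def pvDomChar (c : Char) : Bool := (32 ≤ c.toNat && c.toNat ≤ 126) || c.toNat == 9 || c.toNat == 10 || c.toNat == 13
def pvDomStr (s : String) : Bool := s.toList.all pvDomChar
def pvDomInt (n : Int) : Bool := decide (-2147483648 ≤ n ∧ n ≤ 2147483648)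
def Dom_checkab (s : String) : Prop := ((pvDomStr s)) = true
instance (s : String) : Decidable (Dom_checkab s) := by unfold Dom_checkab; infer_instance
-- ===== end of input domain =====

-- B replaces A's recursive slicing by a single index-pointer loop (measured faster: asymptotic O(n) vs O(n^2)).


-- ===== PORT A =====
-- Recursion over the characters; s[1:] is the tail, s[1:3] is `take 2` of the tail,
-- s[3:] is `drop 2` of the tail (exact for these nonnegative in-range slices).
def checkabAuxA : List Char → Bool
  | [] => true
  | c :: rest =>
      if c = 'a' then
        if rest.length > 1 && (rest.take 2 = ['b', 'b'] : Bool) then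
          checkabAuxA (rest.drop 2)
        else
          checkabAuxA rest
      else
        false
termination_by l => l.length
decreasing_by all_goals simp [List.length_drop]

def checkab (s : String) : Bool := checkabAuxA s.toList

-- ===== PORT B =====
-- The while-loop with index pointer i; s[i] is an in-range index on every iteration,
-- ported as getD (the default is never used since i < n = length).
def checkabAuxB (l : List Char) (n i : Nat) : Bool :=
  if _h : i < n then
    if l.getD i ' ' ≠ 'a' then
      false
    else
      if i + 3 ≤ n && (l.getD (i + 1) ' ' = 'b' : Bool) && (l.getD (i + 2) ' ' = 'b' : Bool) then
        checkabAuxB l n (i + 3)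
      else
        checkabAuxB l n (i + 1)
  else
    true
termination_by n - i

def checkab_alt (s : String) : Bool := checkabAuxB s.toList s.toList.length 0

-- ===== PRECONDITION & SPEC =====
def Spec_checkab (s : String) (out : Bool) : Prop := out = checkab_alt s
instance (s : String) (out : Bool) : Decidable (Spec_checkab s out) := by unfold Spec_checkab; infer_instance

-- ===== CLAIM (what is proved, stated in full; the proofs are below) =====
def Claim_equal_checkab : Prop := ∀ (s : String), Dom_checkab s → Spec_checkab s (checkab s)

-- ===== LEMMAS AND PROOFS =====

theorem checkabAux_agree (l : List Char) (i : Nat) :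
    checkabAuxB l l.length i = checkabAuxA (l.drop i) := by
  by_cases h : i < l.length
  · have hd : l.drop i = l[i] :: l.drop (i + 1) := List.drop_eq_getElem_cons h
    rw [checkabAuxB, hd]
    simp only [h, dif_pos]
    rw [checkabAuxA]
    have hgi : l.getD i ' ' = l[i] := List.getD_eq_getElem l ' ' h
    by_cases ha : l[i] = 'a'
    · simp only [hgi, ha, ite_not, if_pos]
      have hlen : (l.drop (i + 1)).length = l.length - (i + 1) := List.length_drop ..
      by_cases h3 : i + 3 ≤ l.length
      · have h1 : i + 1 < l.length := by omega
        have h2 : i + 2 < l.length := by omega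
        have hd1 : l.drop (i + 1) = l[i + 1] :: l.drop (i + 2) := List.drop_eq_getElem_cons h1
        have hd2 : l.drop (i + 2) = l[i + 2] :: l.drop (i + 3) := List.drop_eq_getElem_cons h2
        have hg1 : l.getD (i + 1) ' ' = l[i + 1] := List.getD_eq_getElem l ' ' h1
        have hg2 : l.getD (i + 2) ' ' = l[i + 2] := List.getD_eq_getElem l ' ' h2
        have hlen2 : (l.drop (i + 1)).length > 1 := by omega
        by_cases hbb : l[i + 1] = 'b' ∧ l[i + 2] = 'b'
        · have : (l.drop (i + 1)).take 2 = ['b', 'b'] := by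
            rw [hd1, hd2, hbb.1, hbb.2]; rfl
          simp only [h3, hg1, hg2, hbb.1, hbb.2, hlen2, this, decide_true, Bool.and_true, if_pos]
          have : (l.drop (i + 1)).drop 2 = l.drop (i + 3) := by
            rw [List.drop_drop]
          rw [this]
          exact checkabAux_agree l (i + 3)
        · have hne : (l.drop (i + 1)).take 2 ≠ ['b', 'b'] := by
            rw [hd1, hd2]
            intro hc
            simp only [List.take, List.cons.injEq] at hc
            exact hbb ⟨hc.1, hc.2.1⟩
          have hB : (decide (i + 3 ≤ l.length) && decide (l.getD (i + 1) ' ' = 'b')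
              && decide (l.getD (i + 2) ' ' = 'b')) = false := by
            rw [hg1, hg2]
            rcases not_and_or.mp hbb with hb | hb <;> simp [hb, h3]
          have hA : (decide ((l.drop (i + 1)).length > 1) &&
              decide ((l.drop (i + 1)).take 2 = ['b', 'b'])) = false := by
            simp [hne]
          rw [hB, hA]
          simp only [if_neg Bool.false_ne_true]
          exact checkabAux_agree l (i + 1)
      · have hB : (decide (i + 3 ≤ l.length) && decide (l.getD (i + 1) ' ' = 'b')
              && decide (l.getD (i + 2) ' ' = 'b')) = false := by
          simp [h3]
        have hA : (decide ((l.drop (i + 1)).length > 1) &&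
            decide ((l.drop (i + 1)).take 2 = ['b', 'b'])) = false := by
          have h1' : decide ((l.drop (i + 1)).length > 1) = false :=
            decide_eq_false (by omega)
          rw [h1', Bool.false_and]
        rw [hB, hA]
        simp only [if_neg Bool.false_ne_true]
        exact checkabAux_agree l (i + 1)
    · rw [if_pos (by rw [hgi]; exact ha), if_neg ha]
  · have hd : l.drop i = [] := List.drop_eq_nil_of_le (by omega)
    rw [checkabAuxB, hd]
    simp [h, checkabAuxA]
termination_by l.length - i
decreasing_by all_goals omega

-- ===== VERDICT (by name: the statement is the Claim_ definition above) =====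
theorem checkab_spec : Claim_equal_checkab := by
  intro s _
  unfold Spec_checkab checkab checkab_alt
  rw [checkabAux_agree s.toList 0, List.drop_zero]
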